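-- pv_equiv track=rewrite | github.com/xination/simple_crush_py | crush_py/tools/find.py | _highlight_fuzzy_match
-- ===== SOURCE A (Python) =====
-- ANSI_RED = "\033[31m"
--
-- ANSI_RESET = "\033[0m"
--
-- def _highlight_fuzzy_match(text: str, needle: str) -> str:
--     if not needle:
--         return text
--     lowered_text = text.lower()
--     positions = []
--     index = -1
--     for char in needle:
--         index = lowered_text.find(char, index + 1)
--         if index < 0:
--             return text
--         positions.append(index)
--
--     parts = []
--     position_set = set(positions)
--     in_highlight = False
--     for idx, char in enumerate(text):
--         if idx in position_set and not in_highlight: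
--             parts.append(ANSI_RED)
--             in_highlight = True
--         if idx not in position_set and in_highlight:
--             parts.append(ANSI_RESET)
--             in_highlight = False
--         parts.append(char)
--     if in_highlight:
--         parts.append(ANSI_RESET)
--     return "".join(parts)
-- ===== SOURCE B (Python) =====
-- ANSI_RED = "\033[31m"
--
-- ANSI_RESET = "\033[0m"
--
-- def _highlight_fuzzy_match(text: str, needle: str) -> str:
--     if not needle:
--         return text
--     lowered_text = text.lower()
--     positions = []
--     index = -1
--     for char in needle:
--         index = lowered_text.find(char, index + 1)
--         if index < 0:
--             return text
--         positions.append(index)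
--
--     # collapse the strictly increasing positions into contiguous runs [start, end)
--     runs = []
--     start = prev = positions[0]
--     for p in positions[1:]:
--         if p == prev + 1:
--             prev = p
--         else:
--             runs.append((start, prev + 1))
--             start = prev = p
--     runs.append((start, prev + 1))
--
--     # build the output by slicing around the runs
--     out = []
--     cursor = 0
--     for s, e in runs:
--         out.append(text[cursor:s])
--         out.append(ANSI_RED)
--         out.append(text[s:e])
--         out.append(ANSI_RESET)
--         cursor = e
--     out.append(text[cursor:])
--     return "".join(out)
-- ===== Notes on version B (the rewrite author's own statement) =====
-- stated objective: alternative
-- what changed: Phase 2 is replaced: instead of scanning every character with a position set and an in_highlight flag, B collapses the match positions into contiguous runs and assembles the output from slices of text around each run.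
import Mathlib
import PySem

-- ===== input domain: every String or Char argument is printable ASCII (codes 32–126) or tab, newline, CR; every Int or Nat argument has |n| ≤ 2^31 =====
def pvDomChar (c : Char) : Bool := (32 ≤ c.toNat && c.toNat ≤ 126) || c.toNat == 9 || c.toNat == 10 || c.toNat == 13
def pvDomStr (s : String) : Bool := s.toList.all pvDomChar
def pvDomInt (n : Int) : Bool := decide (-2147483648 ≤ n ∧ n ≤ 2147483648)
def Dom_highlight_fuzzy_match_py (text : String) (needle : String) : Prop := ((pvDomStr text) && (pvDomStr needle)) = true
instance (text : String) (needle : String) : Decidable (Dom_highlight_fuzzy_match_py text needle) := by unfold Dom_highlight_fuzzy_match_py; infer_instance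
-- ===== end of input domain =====

-- B replaces A's per-character highlight loop (position set + in_highlight flag) by collapsing
-- the match positions into contiguous runs and assembling the output from slices of the text.


-- ===== PORT A =====
def ANSI_RED : List Char := "\x1b[31m".toList
def ANSI_RESET : List Char := "\x1b[0m".toList

-- the 'for char in needle' loop: index = lowered_text.find(char, index + 1);
-- 'none' is the early 'return text' (index < 0).  Shared by B: Source B's phase 1 is
-- textually identical to Source A's.
def fuzzyPositions (lowered : List Char) (needle : List Char) (index : Int) : Option (List Int) :=
  match needle with
  | [] => some []
  | c :: rest =>
    let i := PySem.Chars.findFrom lowered [c] (index + 1)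
    if i < 0 then none
    else (fuzzyPositions lowered rest i).map (i :: ·)

-- the 'for idx, char in enumerate(text)' loop, parts built by structural recursion
def phase2 (t : List Char) (idx : Nat) (ps : List Int) (inh : Bool) : List Char :=
  match t with
  | [] => if inh then ANSI_RESET else []
  | ch :: rest =>
    if ps.contains (idx : Int) && !inh then ANSI_RED ++ ch :: phase2 rest (idx + 1) ps true
    else if !(ps.contains (idx : Int)) && inh then ANSI_RESET ++ ch :: phase2 rest (idx + 1) ps false
    else ch :: phase2 rest (idx + 1) ps inh

def highlight_fuzzy_match_py (text : String) (needle : String) : String :=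
  if needle.toList.isEmpty then text
  else
    match fuzzyPositions (PySem.Chars.lower text.toList) needle.toList (-1) with
    | none => text
    | some positions => String.mk (phase2 text.toList 0 positions false)

-- ===== PORT B =====
-- the 'for p in positions[1:]' loop collapsing positions into runs [start, prev+1)
def groupRuns (ps : List Int) (start prev : Int) : List (Int × Int) :=
  match ps with
  | [] => [(start, prev + 1)]
  | p :: rest =>
    if p = prev + 1 then groupRuns rest start p
    else (start, prev + 1) :: groupRuns rest p p

-- the 'for s, e in runs' loop, slicing text around each run; ends with text[cursor:]
def emitRuns (t : List Char) (runs : List (Int × Int)) (cursor : Int) : List Char :=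
  match runs with
  | [] => PySem.List.slice t (some cursor) none
  | (s, e) :: rest =>
    PySem.List.slice t (some cursor) (some s) ++ ANSI_RED ++ PySem.List.slice t (some s) (some e)
      ++ ANSI_RESET ++ emitRuns t rest e

def highlight_fuzzy_match_py_alt (text : String) (needle : String) : String :=
  if needle.toList.isEmpty then text
  else
    match fuzzyPositions (PySem.Chars.lower text.toList) needle.toList (-1) with
    | none => text
    | some positions =>
      match positions with
      | [] => text   -- unreachable: a nonempty needle yields a nonempty positions list
      | p :: rest => String.mk (emitRuns text.toList (groupRuns rest p p) 0)

-- ===== PRECONDITION & SPEC =====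
def Spec_highlight_fuzzy_match_py (text : String) (needle : String) (out : String) : Prop := out = highlight_fuzzy_match_py_alt text needle
instance (text : String) (needle : String) (out : String) : Decidable (Spec_highlight_fuzzy_match_py text needle out) := by unfold Spec_highlight_fuzzy_match_py; infer_instance

-- ===== CLAIM (what is proved, stated in full; the proofs are below) =====
def Claim_equal_highlight_fuzzy_match_py : Prop := ∀ (text : String) (needle : String), Dom_highlight_fuzzy_match_py text needle → Spec_highlight_fuzzy_match_py text needle (highlight_fuzzy_match_py text needle)

-- ===== LEMMAS AND PROOFS =====

lemma findFrom_ge_lt (s : List Char) (c : Char) (k : Nat) (hk : k ≤ s.length)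
    (h : ¬ PySem.Chars.findFrom s [c] (k : Int) < 0) :
    (k : Int) ≤ PySem.Chars.findFrom s [c] (k : Int) ∧
      PySem.Chars.findFrom s [c] (k : Int) < (s.length : Int) := by
  have hne : PySem.Chars.findFrom s [c] (k : Int) ≠ -1 := by omega
  obtain ⟨h1, h2, -⟩ := PySem.Chars.findFrom_natCast_spec s [c] k hk hne
  have hlen := h2.length_le
  simp [List.length_drop] at hlen
  have h0 : (0 : Int) ≤ PySem.Chars.findFrom s [c] (k : Int) := le_trans (by positivity) h1
  have := Int.toNat_of_nonneg h0
  omega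

lemma findFrom_past (s : List Char) (sub : List Char) (st : Int)
    (h0 : 0 ≤ st) (hk : (s.length : Int) < st) :
    PySem.Chars.findFrom s sub st = -1 := by
  simp only [PySem.Chars.findFrom]
  split_ifs with h <;> omega

lemma fuzzyPositions_spec : ∀ (needle lowered : List Char) (index : Int) (ps : List Int),
    -1 ≤ index → fuzzyPositions lowered needle index = some ps →
    List.Chain (· < ·) index ps ∧ ∀ x ∈ ps, x < (lowered.length : Int) := by
  intro needle
  induction needle with
  | nil =>
    intro lowered index ps _ h
    simp [fuzzyPositions] at h
    subst h
    exact ⟨List.Chain.nil, by simp⟩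
  | cons c rest ih =>
    intro lowered index ps hidx h
    simp only [fuzzyPositions] at h
    by_cases hlt : PySem.Chars.findFrom lowered [c] (index + 1) < 0
    · simp [hlt] at h
    · simp only [hlt, if_false] at h
      obtain ⟨tl, htl, rfl⟩ := Option.map_eq_some_iff.mp h
      have hi1 : 0 ≤ index + 1 := by omega
      have hcast : ((index + 1).toNat : Int) = index + 1 := Int.toNat_of_nonneg hi1
      have hbnd : (index + 1 : Int) ≤ PySem.Chars.findFrom lowered [c] (index + 1) ∧
          PySem.Chars.findFrom lowered [c] (index + 1) < (lowered.length : Int) := by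
        by_cases hle : (index + 1).toNat ≤ lowered.length
        · have := findFrom_ge_lt lowered c (index + 1).toNat hle (by rwa [hcast])
          rwa [hcast] at this
        · exfalso
          have := findFrom_past lowered [c] (index + 1) hi1 (by omega)
          omega
      obtain ⟨hrest, hbound⟩ := ih lowered _ tl (by omega) htl
      refine ⟨List.chain_cons.mpr ⟨by omega, hrest⟩, ?_⟩
      intro x hx
      rcases List.mem_cons.mp hx with rfl | hx
      · exact hbnd.2
      · exact hbound x hx

lemma fuzzyPositions_ne_nil (lowered : List Char) (c : Char) (ns : List Char) (index : Int)
    (ps : List Int) (h : fuzzyPositions lowered (c :: ns) index = some ps) : ps ≠ [] := by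
  simp only [fuzzyPositions] at h
  by_cases hlt : PySem.Chars.findFrom lowered [c] (index + 1) < 0
  · simp [hlt] at h
  · simp only [hlt, if_false] at h
    obtain ⟨tl, -, rfl⟩ := Option.map_eq_some_iff.mp h
    simp

lemma chain_lt_all : ∀ (l : List Int) (p : Int), List.Chain (· < ·) p l → ∀ x ∈ l, p < x := by
  intro l
  induction l with
  | nil => simp
  | cons a l ih =>
    intro p h x hx
    rcases List.chain_cons.mp h with ⟨hpa, h'⟩
    rcases List.mem_cons.mp hx with rfl | hx'
    · exact hpa
    · exact lt_trans hpa (ih a h' x hx')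

lemma phase2_leave (t : List Char) (S : List Int) (i : Nat)
    (h : ((i : Nat) : Int) ∉ S) :
    phase2 (t.drop i) i S true = ANSI_RESET ++ phase2 (t.drop i) i S false := by
  cases hd : t.drop i with
  | nil => simp [phase2]
  | cons ch rest => simp [phase2, h]

lemma phase2_gap (t : List Char) (S : List Int) :
    ∀ (k i : Nat), i + k ≤ t.length →
    (∀ j : Nat, i ≤ j → j < i + k → ((j : Nat) : Int) ∉ S) →
    phase2 (t.drop i) i S false = (t.drop i).take k ++ phase2 (t.drop (i + k)) (i + k) S false := by
  intro k
  induction k with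
  | zero => intro i _ _; simp
  | succ k ihk =>
    intro i hle hmem
    have hi : i < t.length := by omega
    have hc := hmem i le_rfl (by omega)
    have hrec := ihk (i + 1) (by omega) (fun j hj1 hj2 => hmem j (by omega) (by omega))
    have harith : i + 1 + k = i + (k + 1) := by omega
    rw [harith] at hrec
    rw [List.drop_eq_getElem_cons hi]
    simp only [phase2, hrec]
    simp [hc]
    rw [List.drop_eq_getElem_cons hi, List.take_succ_cons]
    simp

lemma phase2_run (t : List Char) (S : List Int) :
    ∀ (k i : Nat), i + k ≤ t.length →
    (∀ j : Nat, i ≤ j → j < i + k → ((j : Nat) : Int) ∈ S) →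
    phase2 (t.drop i) i S true = (t.drop i).take k ++ phase2 (t.drop (i + k)) (i + k) S true := by
  intro k
  induction k with
  | zero => intro i _ _; simp
  | succ k ihk =>
    intro i hle hmem
    have hi : i < t.length := by omega
    have hc := hmem i le_rfl (by omega)
    have hrec := ihk (i + 1) (by omega) (fun j hj1 hj2 => hmem j (by omega) (by omega))
    have harith : i + 1 + k = i + (k + 1) := by omega
    rw [harith] at hrec
    rw [List.drop_eq_getElem_cons hi]
    simp only [phase2, hrec]
    simp [hc]
    rw [List.drop_eq_getElem_cons hi, List.take_succ_cons]
    simp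

lemma phase2_tail (t : List Char) (S : List Int) (i : Nat)
    (h : ∀ j : Nat, i ≤ j → ((j : Nat) : Int) ∉ S) :
    phase2 (t.drop i) i S false = t.drop i := by
  by_cases hi : i ≤ t.length
  · rw [phase2_gap t S (t.length - i) i (by omega) (fun j a _ => h j a)]
    have harith : i + (t.length - i) = t.length := by omega
    rw [harith, List.drop_length]
    simp [phase2, ← List.length_drop, List.take_length]
  · rw [List.drop_eq_nil_of_le (by omega)]
    simp [phase2]

lemma phase2_runF (t : List Char) (S : List Int) (k i : Nat) (hk : 1 ≤ k)
    (hle : i + k ≤ t.length)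
    (hmem : ∀ j : Nat, i ≤ j → j < i + k → ((j : Nat) : Int) ∈ S) :
    phase2 (t.drop i) i S false =
      ANSI_RED ++ ((t.drop i).take k ++ phase2 (t.drop (i + k)) (i + k) S true) := by
  obtain ⟨k', rfl⟩ : ∃ k', k = k' + 1 := ⟨k - 1, by omega⟩
  have hi : i < t.length := by omega
  have hc := hmem i le_rfl (by omega)
  have hrec := phase2_run t S k' (i + 1) (by omega)
    (fun j hj1 hj2 => hmem j (by omega) (by omega))
  have harith : i + 1 + k' = i + (k' + 1) := by omega
  rw [harith] at hrec
  rw [List.drop_eq_getElem_cons hi]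
  simp only [phase2, hrec]
  simp [hc]
  rw [List.drop_eq_getElem_cons hi, List.take_succ_cons]
  simp

lemma main_runs (t : List Char) (S : List Int) :
    ∀ (rest : List Int) (start prev cursor : Nat),
    cursor ≤ start → start ≤ prev → prev < t.length →
    List.Chain (· < ·) (prev : Int) rest →
    (∀ x ∈ rest, x < (t.length : Int)) →
    (∀ j : Nat, cursor ≤ j →
      (((j : Nat) : Int) ∈ S ↔ ((start ≤ j ∧ j ≤ prev) ∨ (j : Int) ∈ rest))) →
    phase2 (t.drop cursor) cursor S false =
      emitRuns t (groupRuns rest (start : Int) (prev : Int)) (cursor : Int) := by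
  intro rest
  induction rest with
  | nil =>
    intro start prev cursor h1 h2 h3 _ _ hmem
    have hgap : ∀ j : Nat, cursor ≤ j → j < cursor + (start - cursor) →
        ((j : Nat) : Int) ∉ S := by
      intro j hj1 hj2 hcon
      rcases (hmem j hj1).mp hcon with ⟨hs, _⟩ | hmem'
      · omega
      · simp at hmem'
    have hrun : ∀ j : Nat, start ≤ j → j < start + (prev + 1 - start) →
        ((j : Nat) : Int) ∈ S := by
      intro j hj1 hj2
      exact (hmem j (by omega)).mpr (Or.inl ⟨hj1, by omega⟩)
    have hnot : (((prev + 1 : Nat) : Nat) : Int) ∉ S := by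
      intro hcon
      rcases (hmem (prev + 1) (by omega)).mp hcon with ⟨_, hs⟩ | hmem'
      · omega
      · simp at hmem'
    have htail : ∀ j : Nat, prev + 1 ≤ j → ((j : Nat) : Int) ∉ S := by
      intro j hj hcon
      rcases (hmem j (by omega)).mp hcon with ⟨_, hs⟩ | hmem'
      · omega
      · simp at hmem'
    rw [phase2_gap t S (start - cursor) cursor (by omega) hgap]
    have e1 : cursor + (start - cursor) = start := by omega
    rw [e1, phase2_runF t S (prev + 1 - start) start (by omega) (by omega) hrun]
    have e2 : start + (prev + 1 - start) = prev + 1 := by omega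
    rw [e2, phase2_leave t S (prev + 1) hnot, phase2_tail t S (prev + 1) htail]
    have c1 : ((prev : Int) + 1) = (((prev + 1 : Nat) : Int)) := by push_cast; ring
    simp only [groupRuns, emitRuns, c1, PySem.List.slice_natCast, PySem.List.slice_from_natCast]
    simp [List.append_assoc]
  | cons p rest' ih =>
    intro start prev cursor h1 h2 h3 hch hlt hmem
    rcases List.chain_cons.mp hch with ⟨hpp, hch'⟩
    have hplen : p < (t.length : Int) := hlt p (by simp)
    have hprev0 : (0 : Int) ≤ (prev : Int) := by positivity
    have hp0 : (0 : Int) ≤ p := by omega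
    have hpcast : ((p.toNat : Nat) : Int) = p := Int.toNat_of_nonneg hp0
    by_cases hpe : p = (prev : Int) + 1
    · have hgr : groupRuns (p :: rest') (start : Int) (prev : Int)
          = groupRuns rest' (start : Int) p := by simp [groupRuns, hpe]
      rw [hgr]
      have c1 : p = (((prev + 1 : Nat) : Int)) := by rw [hpe]; push_cast; ring
      rw [c1]
      refine ih start (prev + 1) cursor (by omega) (by omega) (by omega) ?_ ?_ ?_
      · rw [← c1]; exact hch'
      · intro x hx; exact hlt x (by simp [hx])
      · intro j hj
        rw [hmem j hj]
        constructor
        · rintro (⟨hs, hp⟩ | hx)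
          · exact Or.inl ⟨hs, by omega⟩
          · rcases List.mem_cons.mp hx with rfl | hx'
            · refine Or.inl ⟨by omega, by omega⟩
            · exact Or.inr hx'
        · rintro (⟨hs, hp⟩ | hx)
          · by_cases hjp : j ≤ prev
            · exact Or.inl ⟨hs, hjp⟩
            · refine Or.inr (List.mem_cons.mpr (Or.inl ?_)); omega
          · exact Or.inr (List.mem_cons.mpr (Or.inr hx))
    · have hplt : (prev : Int) + 1 < p := by omega
      have hrest' : ∀ x ∈ rest', p < x := chain_lt_all rest' p hch'
      have hgap : ∀ j : Nat, cursor ≤ j → j < cursor + (start - cursor) →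
          ((j : Nat) : Int) ∉ S := by
        intro j hj1 hj2 hcon
        rcases (hmem j hj1).mp hcon with ⟨hs, _⟩ | hmem'
        · omega
        · rcases List.mem_cons.mp hmem' with heq | hx
          · omega
          · have := hrest' _ hx; omega
      have hrun : ∀ j : Nat, start ≤ j → j < start + (prev + 1 - start) →
          ((j : Nat) : Int) ∈ S := by
        intro j hj1 hj2
        exact (hmem j (by omega)).mpr (Or.inl ⟨hj1, by omega⟩)
      have hnot : (((prev + 1 : Nat) : Nat) : Int) ∉ S := by
        intro hcon
        rcases (hmem (prev + 1) (by omega)).mp hcon with ⟨_, hs⟩ | hmem'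
        · omega
        · rcases List.mem_cons.mp hmem' with heq | hx
          · push_cast at heq; omega
          · have := hrest' _ hx; push_cast at *; omega
      rw [phase2_gap t S (start - cursor) cursor (by omega) hgap]
      have e1 : cursor + (start - cursor) = start := by omega
      rw [e1, phase2_runF t S (prev + 1 - start) start (by omega) (by omega) hrun]
      have e2 : start + (prev + 1 - start) = prev + 1 := by omega
      rw [e2, phase2_leave t S (prev + 1) hnot]
      have hrec := ih p.toNat p.toNat (prev + 1) (by omega) le_rfl (by omega) ?_ ?_ ?_
      · rw [hrec]
        have hgr : groupRuns (p :: rest') (start : Int) (prev : Int)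
            = ((start : Int), (prev : Int) + 1) :: groupRuns rest' p p := by
          simp [groupRuns, hpe]
        rw [hgr]
        have c1 : ((prev : Int) + 1) = (((prev + 1 : Nat) : Int)) := by push_cast; ring
        simp only [emitRuns, c1, hpcast, PySem.List.slice_natCast]
        simp [List.append_assoc]
      · rw [hpcast]; exact hch'
      · intro x hx; exact hlt x (by simp [hx])
      · intro j hj
        rw [hmem j (by omega)]
        constructor
        · rintro (⟨hs, hp⟩ | hx)
          · omega
          · rcases List.mem_cons.mp hx with heq | hx'
            · refine Or.inl ⟨by omega, by omega⟩
            · exact Or.inr hx'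
        · rintro (⟨hs, hp⟩ | hx)
          · have : j = p.toNat := by omega
            subst this
            exact Or.inr (List.mem_cons.mpr (Or.inl hpcast))
          · exact Or.inr (List.mem_cons.mpr (Or.inr hx))

-- ===== VERDICT (by name: the statement is the Claim_ definition above) =====
theorem highlight_fuzzy_match_py_spec : Claim_equal_highlight_fuzzy_match_py := by
  intro text needle _
  unfold Spec_highlight_fuzzy_match_py highlight_fuzzy_match_py highlight_fuzzy_match_py_alt
  by_cases hne : needle.toList.isEmpty
  · simp [hne]
  · simp only [hne, Bool.false_eq_true, if_false]
    cases hfp : fuzzyPositions (PySem.Chars.lower text.toList) needle.toList (-1) with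
    | none => rfl
    | some ps =>
      obtain ⟨c, ns, hn⟩ : ∃ c ns, needle.toList = c :: ns := by
        cases h : needle.toList with
        | nil => rw [h] at hne; simp at hne
        | cons c ns => exact ⟨c, ns, rfl⟩
      rw [hn] at hfp
      cases ps with
      | nil => exact absurd rfl (fuzzyPositions_ne_nil _ _ _ _ _ hfp)
      | cons p rest =>
        show String.mk (phase2 text.toList 0 (p :: rest) false)
          = String.mk (emitRuns text.toList (groupRuns rest p p) 0)
        obtain ⟨hch, hbnd⟩ := fuzzyPositions_spec _ _ _ _ (by omega) hfp
        rcases List.chain_cons.mp hch with ⟨hp1, hch'⟩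
        have hlow : (PySem.Chars.lower text.toList).length = text.toList.length := by
          simp [PySem.Chars.lower]
        rw [hlow] at hbnd
        have hp0 : (0 : Int) ≤ p := by omega
        have hpcast : ((p.toNat : Nat) : Int) = p := Int.toNat_of_nonneg hp0
        have hplen : p < (text.toList.length : Int) := hbnd p (by simp)
        have hm := main_runs text.toList (p :: rest) rest p.toNat p.toNat 0
          (by omega) le_rfl (by omega)
          (by rw [hpcast]; exact hch')
          (fun x hx => hbnd x (by simp [hx]))
          ?_
        · rw [List.drop_zero] at hm
          simp only [Nat.cast_zero, hpcast] at hm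
          exact congrArg String.mk hm
        · intro j _
          rw [List.mem_cons]
          constructor
          · rintro (heq | hx)
            · exact Or.inl ⟨by omega, by omega⟩
            · exact Or.inr hx
          · rintro (⟨hs, hp⟩ | hx)
            · have : j = p.toNat := by omega
              subst this; exact Or.inl hpcast
            · exact Or.inr hx
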